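-- pv_equiv track=rewrite | github.com/AllysonGS/gerador-de-senhas | password_generator.py | avaliar_senha
-- ===== SOURCE A (Python) =====
-- import string
--
-- def avaliar_senha(senha):
--     pontos = 0
--
--     # Comprimento
--     if len(senha) >= 8:
--         pontos += 1
--     if len(senha) >= 12:
--         pontos += 1
--
--     # Letras maiúsculas e minúsculas
--     if any(c.islower() for c in senha):
--         pontos += 1
--     if any(c.isupper() for c in senha):
--         pontos += 1
--
--     # Números
--     if any(c.isdigit() for c in senha):
--         pontos += 1
--
--     # Símbolos
--     if any(c in string.punctuation for c in senha):
--         pontos += 1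
--
--     # Avaliação final
--     if pontos <= 2:
--         return "Senha fraca"
--     elif pontos == 3 or pontos == 4:
--         return "Senha média"
--     elif pontos == 5:
--         return "Senha forte"
--     else:
--         return "Senha muito forte"
-- ===== SOURCE B (Python) =====
-- import string
--
-- def avaliar_senha(senha):
--     # single pass: four presence flags instead of four any() scans
--     low = up = dig = sym = False
--     for c in senha:
--         low = low or c.islower()
--         up = up or c.isupper()
--         dig = dig or c.isdigit()
--         sym = sym or c in string.punctuation
--     pontos = (len(senha) >= 8) + (len(senha) >= 12) + low + up + dig + sym
--     if pontos <= 2: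
--         return "Senha fraca"
--     if pontos in (3, 4):
--         return "Senha média"
--     if pontos == 5:
--         return "Senha forte"
--     return "Senha muito forte"
-- ===== Notes on version B (the rewrite author's own statement) =====
-- stated objective: faster
-- what changed: Replaces A's four separate any() scans over the password with one single pass maintaining four presence flags, and replaces the chain of point increments by a direct sum of boolean indicators.
import Mathlib
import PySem

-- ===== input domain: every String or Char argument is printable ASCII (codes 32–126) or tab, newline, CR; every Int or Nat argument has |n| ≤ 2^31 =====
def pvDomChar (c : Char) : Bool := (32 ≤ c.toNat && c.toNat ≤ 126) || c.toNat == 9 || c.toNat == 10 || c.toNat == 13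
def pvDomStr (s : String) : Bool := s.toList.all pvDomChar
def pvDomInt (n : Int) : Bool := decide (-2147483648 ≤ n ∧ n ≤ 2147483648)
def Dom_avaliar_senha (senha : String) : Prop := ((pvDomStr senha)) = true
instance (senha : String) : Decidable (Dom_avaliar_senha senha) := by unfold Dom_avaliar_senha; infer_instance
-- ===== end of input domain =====

-- B does one pass with four presence flags instead of A's four any() scans; same labels.

-- string.punctuation
def pvPunct : List Char := "!\"#$%&'()*+,-./:;<=>?@[\\]^_`{|}~".toList

-- ===== PORT A =====
def avaliar_senha (senha : String) : String :=
  let cs := senha.toList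
  let pontos : Int := 0
  let pontos := if (PySem.Str.len senha) ≥ 8 then pontos + 1 else pontos
  let pontos := if (PySem.Str.len senha) ≥ 12 then pontos + 1 else pontos
  let pontos := if cs.any (fun c => PySem.Chars.islower c) then pontos + 1 else pontos
  let pontos := if cs.any (fun c => PySem.Chars.isupper c) then pontos + 1 else pontos
  let pontos := if cs.any (fun c => PySem.Chars.isdigit c) then pontos + 1 else pontos
  let pontos := if cs.any (fun c => pvPunct.contains c) then pontos + 1 else pontos
  if pontos ≤ 2 then "Senha fraca"
  else if pontos = 3 ∨ pontos = 4 then "Senha média"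
  else if pontos = 5 then "Senha forte"
  else "Senha muito forte"

-- ===== PORT B =====
def pvB2I (b : Bool) : Int := if b then 1 else 0

def avaliar_senha_alt (senha : String) : String :=
  let f := senha.toList.foldl
    (fun (f : Bool × Bool × Bool × Bool) c =>
      (f.1 || PySem.Chars.islower c,
       f.2.1 || PySem.Chars.isupper c,
       f.2.2.1 || PySem.Chars.isdigit c,
       f.2.2.2 || pvPunct.contains c))
    (false, false, false, false)
  let pontos : Int :=
    pvB2I (PySem.Str.len senha ≥ 8) + pvB2I (PySem.Str.len senha ≥ 12)
      + pvB2I f.1 + pvB2I f.2.1 + pvB2I f.2.2.1 + pvB2I f.2.2.2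
  if pontos ≤ 2 then "Senha fraca"
  else if pontos = 3 ∨ pontos = 4 then "Senha média"
  else if pontos = 5 then "Senha forte"
  else "Senha muito forte"

-- ===== PRECONDITION & SPEC =====
def Spec_avaliar_senha (senha : String) (out : String) : Prop := out = avaliar_senha_alt senha
instance (senha : String) (out : String) : Decidable (Spec_avaliar_senha senha out) := by unfold Spec_avaliar_senha; infer_instance

-- ===== CLAIM (what is proved, stated in full; the proofs are below) =====
def Claim_equal_avaliar_senha : Prop := ∀ (senha : String), Dom_avaliar_senha senha → Spec_avaliar_senha senha (avaliar_senha senha)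

-- ===== LEMMAS AND PROOFS =====

theorem pvFlags_foldl (p1 p2 p3 p4 : Char → Bool) (l : List Char) (a b c d : Bool) :
    l.foldl (fun (f : Bool × Bool × Bool × Bool) ch =>
      (f.1 || p1 ch, f.2.1 || p2 ch, f.2.2.1 || p3 ch, f.2.2.2 || p4 ch)) (a, b, c, d)
    = (a || l.any p1, b || l.any p2, c || l.any p3, d || l.any p4) := by
  induction l generalizing a b c d with
  | nil => simp
  | cons x xs ih => simp [List.foldl_cons, ih, Bool.or_assoc]

set_option maxHeartbeats 1000000 in
theorem avaliar_senha_spec : Claim_equal_avaliar_senha := by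
  intro senha _
  unfold Spec_avaliar_senha avaliar_senha avaliar_senha_alt
  rw [pvFlags_foldl]
  simp only [Bool.false_or, pvB2I, decide_eq_true_eq]
  split_ifs <;> first | rfl | (exfalso; omega)
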